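-- pv_equiv track=rewrite | github.com/Wanderer94/CodingTest | 옹알이2/sol.py | solution
-- ===== SOURCE A (Python) =====
-- def solution(babbling):
--     answer = 0
--     l = [ "aya", "ye", "woo", "ma" ]
--     for i in babbling:
--         ans = ''
--         result = False
--         index = -1
--         for j in i:
--             ans += j
--             if ans == "aya" and index != 0:
--                 index = l.index(ans)
--                 ans = ''
--                 result = True
--             elif ans == "ye" and index != 1:
--                 index = l.index(ans)
--                 ans = ''
--                 result = True
--             elif ans == "woo" and index != 2:
--                 index = l.index(ans)
--                 ans = ''
--                 result = True
--             elif ans == "ma" and index != 3: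
--                 index = l.index(ans)
--                 ans = ''
--                 result = True
--             else:
--                 result = False
--         if result == True:
--             answer += 1
--
--
--     return answer
-- ===== SOURCE B (Python) =====
-- def solution(babbling):
--     words = ["aya", "ye", "woo", "ma"]
--     answer = 0
--     for s in babbling:
--         pos = 0
--         prev = -1
--         matched = False
--         while pos < len(s):
--             for idx, w in enumerate(words):
--                 if idx != prev and s.startswith(w, pos):
--                     pos += len(w)
--                     prev = idx
--                     matched = True
--                     break
--             else:
--                 matched = False
--                 break
--         if matched:
--             answer += 1
--     return answer
-- ===== Notes on version B (the rewrite author's own statement) =====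
-- stated objective: simpler
-- what changed: Replaces A's character-by-character accumulator with branch-per-word string comparisons by a word-level greedy parser: a position pointer that at each step finds the one word (index differing from the previous) matching via startswith and jumps by its length, counting the string when the pointer reaches the end having matched at least one word.
import Mathlib
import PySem

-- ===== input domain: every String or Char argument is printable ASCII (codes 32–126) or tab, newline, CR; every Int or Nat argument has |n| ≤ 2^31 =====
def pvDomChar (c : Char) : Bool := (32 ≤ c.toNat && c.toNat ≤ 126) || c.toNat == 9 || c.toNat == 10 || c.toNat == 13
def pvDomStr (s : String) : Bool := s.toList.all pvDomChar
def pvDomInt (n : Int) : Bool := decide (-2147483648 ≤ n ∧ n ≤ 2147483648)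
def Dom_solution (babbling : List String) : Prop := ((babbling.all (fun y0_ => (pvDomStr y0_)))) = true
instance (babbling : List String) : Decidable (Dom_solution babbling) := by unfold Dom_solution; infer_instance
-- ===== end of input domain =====

-- B replaces A's char-by-char accumulator with a word-level greedy pointer parser (simpler decomposition; same cost).

-- ===== PORT A =====
-- strings handled as their char lists (exact: 'ans += j' is list append, '==' is list equality)
def pvL : List String := ["aya", "ye", "woo", "ma"]

-- one iteration of A's inner 'for j in i' loop on state (ans, result, index)
def pvStepA (st : List Char × Bool × Int) (j : Char) : List Char × Bool × Int :=
  let ans := st.1 ++ [j]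
  if ans = "aya".toList ∧ st.2.2 ≠ 0 then
    ([], true, ((PySem.List.index? pvL "aya").getD 0 : Int))
  else if ans = "ye".toList ∧ st.2.2 ≠ 1 then
    ([], true, ((PySem.List.index? pvL "ye").getD 0 : Int))
  else if ans = "woo".toList ∧ st.2.2 ≠ 2 then
    ([], true, ((PySem.List.index? pvL "woo").getD 0 : Int))
  else if ans = "ma".toList ∧ st.2.2 ≠ 3 then
    ([], true, ((PySem.List.index? pvL "ma").getD 0 : Int))
  else (ans, false, st.2.2)

def solution (babbling : List String) : Int :=
  babbling.foldl (fun answer i =>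
    let st := i.toList.foldl pvStepA ([], false, -1)
    if st.2.1 = true then answer + 1 else answer) 0

-- ===== PORT B =====
def pvWords : List (List Char) := (["aya", "ye", "woo", "ma"]).map String.toList

-- Source B's inner 'for idx, w in enumerate(words)' with break: first word whose index
-- differs from prev and which starts at the current position (remaining chars = s)
def pvPick (s : List Char) (prev : Int) : Option (Int × List Char) :=
  (PySem.List.enumerate pvWords).find?
    (fun p => decide (p.1 ≠ prev) && PySem.Chars.startswith s p.2)

theorem pvPick_some_pos {s : List Char} {prev : Int} {i : Int} {w : List Char}
    (h : pvPick s prev = some (i, w)) : 0 < w.length := by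
  have hm := List.mem_of_find?_eq_some h
  simp only [pvWords, PySem.List.enumerate, List.map] at hm
  fin_cases hm <;> decide

-- Source B's 'while pos < len(s)' loop; the position pointer is modeled by the
-- remaining suffix s (pos advances by len(w) = drop w.length)
def pvParse (s : List Char) (prev : Int) (matched : Bool) : Bool :=
  if h : s = [] then matched
  else
    match hp : pvPick s prev with
    | some (i, w) => pvParse (s.drop w.length) i true
    | none => false
termination_by s.length
decreasing_by
  have := pvPick_some_pos hp
  have : s.length ≠ 0 := fun hn => h (List.eq_nil_of_length_eq_zero hn)
  simp [List.length_drop]; omega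

def solution_alt (babbling : List String) : Int :=
  babbling.foldl (fun answer s =>
    if pvParse s.toList (-1) false then answer + 1 else answer) 0

-- ===== PRECONDITION & SPEC =====
def Spec_solution (babbling : List String) (out : Int) : Prop := out = solution_alt babbling
instance (babbling : List String) (out : Int) : Decidable (Spec_solution babbling out) := by unfold Spec_solution; infer_instance

-- ===== CLAIM (what is proved, stated in full; the proofs are below) =====
def Claim_equal_solution : Prop := ∀ (babbling : List String), Dom_solution babbling → Spec_solution babbling (solution babbling)

-- ===== LEMMAS AND PROOFS =====

-- pvPick as four nested ifs
theorem pvPick_eq (s : List Char) (prev : Int) : pvPick s prev =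
    if (0 : Int) ≠ prev ∧ "aya".toList <+: s then some (0, "aya".toList)
    else if (1 : Int) ≠ prev ∧ "ye".toList <+: s then some (1, "ye".toList)
    else if (2 : Int) ≠ prev ∧ "woo".toList <+: s then some (2, "woo".toList)
    else if (3 : Int) ≠ prev ∧ "ma".toList <+: s then some (3, "ma".toList)
    else none := by
  simp only [pvPick, pvWords, List.map, PySem.List.enumerate_cons, PySem.List.enumerate_nil,
    List.find?]
  split_ifs <;> (repeat' split) <;>
    simp_all [Bool.and_eq_true, ← PySem.Chars.startswith_iff, not_and_or]

-- one unfolding step of pvParse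
theorem pvParse_eq_some {s : List Char} {prev i : Int} {w : List Char} (b : Bool)
    (hne : s ≠ []) (h : pvPick s prev = some (i, w)) :
    pvParse s prev b = pvParse (s.drop w.length) i true := by
  rw [pvParse, dif_neg hne]
  split
  · next i' w' hp =>
    rw [h] at hp
    obtain ⟨rfl, rfl⟩ : i = i' ∧ w = w' := by simpa using hp
    rfl
  · next hp => rw [h] at hp; simp at hp

theorem pvParse_eq_false {s : List Char} {prev : Int} (b : Bool)
    (hne : s ≠ []) (h : pvPick s prev = none) : pvParse s prev b = false := by
  rw [pvParse, dif_neg hne]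
  split
  · next i' w' hp => rw [h] at hp; simp at hp
  · rfl

-- a state whose pending 'ans' is no prefix of any word can never match again
def pvDead (ans : List Char) : Prop := ∀ w ∈ pvWords, ¬ ans <+: w

theorem pv_dead_run (s : List Char) : ∀ (ans : List Char) (prev : Int),
    pvDead ans → ans ≠ [] → (s.foldl pvStepA (ans, false, prev)).2.1 = false := by
  induction s with
  | nil => intro ans prev _ _; rfl
  | cons c s ih =>
    intro ans prev hd hne
    have hnw : ∀ w ∈ pvWords, ans ++ [c] ≠ w := by
      intro w hw he
      exact hd w hw (he ▸ List.prefix_append ans [c])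
    have hd' : pvDead (ans ++ [c]) := by
      intro w hw hpre
      exact hd w hw ((List.prefix_append ans [c]).trans hpre)
    have h0 := hnw "aya".toList (by decide)
    have h1 := hnw "ye".toList (by decide)
    have h2 := hnw "woo".toList (by decide)
    have h3 := hnw "ma".toList (by decide)
    simp only [List.foldl, pvStepA, h0, h1, h2, h3, false_and, if_false, ite_false]
    exact ih (ans ++ [c]) prev hd' (by simp)

-- concrete values of A's l.index calls
theorem pv_idx0 : (((List.idxOf? "aya" pvL).getD 0 : Nat) : Int) = 0 := by decide
theorem pv_idx1 : (((List.idxOf? "ye" pvL).getD 0 : Nat) : Int) = 1 := by decide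
theorem pv_idx2 : (((List.idxOf? "woo" pvL).getD 0 : Nat) : Int) = 2 := by decide
theorem pv_idx3 : (((List.idxOf? "ma" pvL).getD 0 : Nat) : Int) = 3 := by decide

-- A consumes a matchable word and resets its accumulator
theorem pv_chunk0 (rest : List Char) (b : Bool) {prev : Int} (h : prev ≠ 0) :
    (("aya".toList ++ rest).foldl pvStepA ([], b, prev)) = rest.foldl pvStepA ([], true, 0) := by
  simp [List.foldl, pvStepA, h, pv_idx0]
theorem pv_chunk1 (rest : List Char) (b : Bool) {prev : Int} (h : prev ≠ 1) :
    (("ye".toList ++ rest).foldl pvStepA ([], b, prev)) = rest.foldl pvStepA ([], true, 1) := by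
  simp [List.foldl, pvStepA, h, pv_idx1]
theorem pv_chunk2 (rest : List Char) (b : Bool) {prev : Int} (h : prev ≠ 2) :
    (("woo".toList ++ rest).foldl pvStepA ([], b, prev)) = rest.foldl pvStepA ([], true, 2) := by
  simp [List.foldl, pvStepA, h, pv_idx2]
theorem pv_chunk3 (rest : List Char) (b : Bool) {prev : Int} (h : prev ≠ 3) :
    (("ma".toList ++ rest).foldl pvStepA ([], b, prev)) = rest.foldl pvStepA ([], true, 3) := by
  simp [List.foldl, pvStepA, h, pv_idx3]

-- a word repeated right after itself is blocked and poisons the rest of the string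
theorem pv_blocked0 (rest : List Char) (b : Bool) :
    (("aya".toList ++ rest).foldl pvStepA ([], b, (0 : Int))).2.1 = false := by
  have h3 : ("aya".toList ++ rest).foldl pvStepA ([], b, (0 : Int))
      = rest.foldl pvStepA ("aya".toList, false, 0) := by
    simp [List.foldl, pvStepA]
  rw [h3]
  cases rest with
  | nil => rfl
  | cons c r =>
    have hstep : (c :: r).foldl pvStepA ("aya".toList, false, (0 : Int))
        = r.foldl pvStepA ("aya".toList ++ [c], false, 0) := by
      simp [List.foldl, pvStepA]
    rw [hstep]
    exact pv_dead_run r _ 0 (by intro w hw; fin_cases hw <;> simp) (by simp)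
theorem pv_blocked1 (rest : List Char) (b : Bool) :
    (("ye".toList ++ rest).foldl pvStepA ([], b, (1 : Int))).2.1 = false := by
  have h3 : ("ye".toList ++ rest).foldl pvStepA ([], b, (1 : Int))
      = rest.foldl pvStepA ("ye".toList, false, 1) := by
    simp [List.foldl, pvStepA]
  rw [h3]
  cases rest with
  | nil => rfl
  | cons c r =>
    have hstep : (c :: r).foldl pvStepA ("ye".toList, false, (1 : Int))
        = r.foldl pvStepA ("ye".toList ++ [c], false, 1) := by
      simp [List.foldl, pvStepA]
    rw [hstep]
    exact pv_dead_run r _ 1 (by intro w hw; fin_cases hw <;> simp) (by simp)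
theorem pv_blocked2 (rest : List Char) (b : Bool) :
    (("woo".toList ++ rest).foldl pvStepA ([], b, (2 : Int))).2.1 = false := by
  have h3 : ("woo".toList ++ rest).foldl pvStepA ([], b, (2 : Int))
      = rest.foldl pvStepA ("woo".toList, false, 2) := by
    simp [List.foldl, pvStepA]
  rw [h3]
  cases rest with
  | nil => rfl
  | cons c r =>
    have hstep : (c :: r).foldl pvStepA ("woo".toList, false, (2 : Int))
        = r.foldl pvStepA ("woo".toList ++ [c], false, 2) := by
      simp [List.foldl, pvStepA]
    rw [hstep]
    exact pv_dead_run r _ 2 (by intro w hw; fin_cases hw <;> simp) (by simp)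
theorem pv_blocked3 (rest : List Char) (b : Bool) :
    (("ma".toList ++ rest).foldl pvStepA ([], b, (3 : Int))).2.1 = false := by
  have h3 : ("ma".toList ++ rest).foldl pvStepA ([], b, (3 : Int))
      = rest.foldl pvStepA ("ma".toList, false, 3) := by
    simp [List.foldl, pvStepA]
  rw [h3]
  cases rest with
  | nil => rfl
  | cons c r =>
    have hstep : (c :: r).foldl pvStepA ("ma".toList, false, (3 : Int))
        = r.foldl pvStepA ("ma".toList ++ [c], false, 3) := by
      simp [List.foldl, pvStepA]
    rw [hstep]
    exact pv_dead_run r _ 3 (by intro w hw; fin_cases hw <;> simp) (by simp)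

-- if no word starts the string, A's inner loop can never match
theorem pv_nomatch (c : Char) (s' : List Char) (prev : Int) (b : Bool)
    (hno : ∀ w ∈ pvWords, ¬ w <+: (c :: s')) :
    ((c :: s').foldl pvStepA ([], b, prev)).2.1 = false := by
  have hA : ¬ "aya".toList <+: (c :: s') := hno _ (by decide)
  have hB : ¬ "ye".toList <+: (c :: s') := hno _ (by decide)
  have hC : ¬ "woo".toList <+: (c :: s') := hno _ (by decide)
  have hD : ¬ "ma".toList <+: (c :: s') := hno _ (by decide)
  have hstep : (c :: s').foldl pvStepA ([], b, prev) = s'.foldl pvStepA ([c], false, prev) := by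
    simp [List.foldl, pvStepA]
  rw [hstep]
  by_cases hc : c = 'a' ∨ c = 'y' ∨ c = 'w' ∨ c = 'm'
  · rcases hc with rfl | rfl | rfl | rfl
    · -- candidate "aya"
      cases s' with
      | nil => rfl
      | cons c₂ s₂ =>
        have hstep2 : (c₂ :: s₂).foldl pvStepA (['a'], false, prev)
            = s₂.foldl pvStepA (['a', c₂], false, prev) := by
          simp [List.foldl, pvStepA]
        rw [hstep2]
        by_cases hc₂ : c₂ = 'y'
        · subst hc₂
          cases s₂ with
          | nil => rfl
          | cons c₃ s₃ =>
            have hc₃ : c₃ ≠ 'a' := by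
              intro h; subst h; exact hA (by simp [List.cons_prefix_cons])
            have hstep3 : (c₃ :: s₃).foldl pvStepA (['a', 'y'], false, prev)
                = s₃.foldl pvStepA (['a', 'y', c₃], false, prev) := by
              simp [List.foldl, pvStepA, hc₃]
            rw [hstep3]
            exact pv_dead_run s₃ _ prev
              (by intro w hw; fin_cases hw <;> simp [List.cons_prefix_cons, hc₃]) (by simp)
        · exact pv_dead_run s₂ _ prev
            (by intro w hw; fin_cases hw <;> simp [List.cons_prefix_cons, hc₂]) (by simp)
    · -- candidate "ye"
      cases s' with
      | nil => rfl
      | cons c₂ s₂ =>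
        have hc₂ : c₂ ≠ 'e' := by
          intro h; subst h; exact hB (by simp [List.cons_prefix_cons])
        have hstep2 : (c₂ :: s₂).foldl pvStepA (['y'], false, prev)
            = s₂.foldl pvStepA (['y', c₂], false, prev) := by
          simp [List.foldl, pvStepA, hc₂]
        rw [hstep2]
        exact pv_dead_run s₂ _ prev
          (by intro w hw; fin_cases hw <;> simp [List.cons_prefix_cons, hc₂]) (by simp)
    · -- candidate "woo"
      cases s' with
      | nil => rfl
      | cons c₂ s₂ =>
        have hstep2 : (c₂ :: s₂).foldl pvStepA (['w'], false, prev)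
            = s₂.foldl pvStepA (['w', c₂], false, prev) := by
          simp [List.foldl, pvStepA]
        rw [hstep2]
        by_cases hc₂ : c₂ = 'o'
        · subst hc₂
          cases s₂ with
          | nil => rfl
          | cons c₃ s₃ =>
            have hc₃ : c₃ ≠ 'o' := by
              intro h; subst h; exact hC (by simp [List.cons_prefix_cons])
            have hstep3 : (c₃ :: s₃).foldl pvStepA (['w', 'o'], false, prev)
                = s₃.foldl pvStepA (['w', 'o', c₃], false, prev) := by
              simp [List.foldl, pvStepA, hc₃]
            rw [hstep3]
            exact pv_dead_run s₃ _ prev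
              (by intro w hw; fin_cases hw <;> simp [List.cons_prefix_cons, hc₃]) (by simp)
        · exact pv_dead_run s₂ _ prev
            (by intro w hw; fin_cases hw <;> simp [List.cons_prefix_cons, hc₂]) (by simp)
    · -- candidate "ma"
      cases s' with
      | nil => rfl
      | cons c₂ s₂ =>
        have hc₂ : c₂ ≠ 'a' := by
          intro h; subst h; exact hD (by simp [List.cons_prefix_cons])
        have hstep2 : (c₂ :: s₂).foldl pvStepA (['m'], false, prev)
            = s₂.foldl pvStepA (['m', c₂], false, prev) := by
          simp [List.foldl, pvStepA, hc₂]
        rw [hstep2]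
        exact pv_dead_run s₂ _ prev
          (by intro w hw; fin_cases hw <;> simp [List.cons_prefix_cons, hc₂]) (by simp)
  · push_neg at hc
    exact pv_dead_run s' _ prev
      (by intro w hw; fin_cases hw <;>
        simp [List.cons_prefix_cons, hc.1, hc.2.1, hc.2.2.1, hc.2.2.2]) (by simp)

-- A's inner loop equals B's greedy word parser, for every pending index and flag
theorem pv_inner (n : Nat) : ∀ (s : List Char), s.length ≤ n → ∀ (prev : Int) (b : Bool),
    (s.foldl pvStepA ([], b, prev)).2.1 = pvParse s prev b := by
  induction n with
  | zero =>
    intro s hs prev b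
    have : s = [] := List.eq_nil_of_length_eq_zero (Nat.le_zero.mp hs)
    subst this
    simp [pvParse]
  | succ n ih =>
    intro s hs prev b
    cases s with
    | nil => simp [pvParse]
    | cons c s' =>
      have hne : (c :: s') ≠ ([] : List Char) := by simp
      by_cases h1 : (0 : Int) ≠ prev ∧ "aya".toList <+: (c :: s')
      · obtain ⟨rest, hr⟩ := h1.2
        have hpick : pvPick (c :: s') prev = some (0, "aya".toList) := by
          rw [pvPick_eq, if_pos h1]
        rw [pvParse_eq_some b hne hpick, ← hr, pv_chunk0 rest b (Ne.symm h1.1), List.drop_left]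
        have hlen : rest.length ≤ n := by
          have := hs; rw [← hr] at this; simp at this; omega
        exact ih rest hlen 0 true
      · by_cases h2 : (1 : Int) ≠ prev ∧ "ye".toList <+: (c :: s')
        · obtain ⟨rest, hr⟩ := h2.2
          have hpick : pvPick (c :: s') prev = some (1, "ye".toList) := by
            rw [pvPick_eq, if_neg h1, if_pos h2]
          rw [pvParse_eq_some b hne hpick, ← hr, pv_chunk1 rest b (Ne.symm h2.1), List.drop_left]
          have hlen : rest.length ≤ n := by
            have := hs; rw [← hr] at this; simp at this; omega
          exact ih rest hlen 1 true
        · by_cases h3 : (2 : Int) ≠ prev ∧ "woo".toList <+: (c :: s')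
          · obtain ⟨rest, hr⟩ := h3.2
            have hpick : pvPick (c :: s') prev = some (2, "woo".toList) := by
              rw [pvPick_eq, if_neg h1, if_neg h2, if_pos h3]
            rw [pvParse_eq_some b hne hpick, ← hr, pv_chunk2 rest b (Ne.symm h3.1), List.drop_left]
            have hlen : rest.length ≤ n := by
              have := hs; rw [← hr] at this; simp at this; omega
            exact ih rest hlen 2 true
          · by_cases h4 : (3 : Int) ≠ prev ∧ "ma".toList <+: (c :: s')
            · obtain ⟨rest, hr⟩ := h4.2
              have hpick : pvPick (c :: s') prev = some (3, "ma".toList) := by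
                rw [pvPick_eq, if_neg h1, if_neg h2, if_neg h3, if_pos h4]
              rw [pvParse_eq_some b hne hpick, ← hr, pv_chunk3 rest b (Ne.symm h4.1), List.drop_left]
              have hlen : rest.length ≤ n := by
                have := hs; rw [← hr] at this; simp at this; omega
              exact ih rest hlen 3 true
            · have hparse : pvParse (c :: s') prev b = false := by
                have hpick : pvPick (c :: s') prev = none := by
                  rw [pvPick_eq, if_neg h1, if_neg h2, if_neg h3, if_neg h4]
                exact pvParse_eq_false b hne hpick
              rw [hparse]
              -- either some word is a (repeat-blocked) prefix, or none is
              by_cases p0 : "aya".toList <+: (c :: s')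
              · have hp : prev = 0 := by
                  rcases not_and_or.mp h1 with h | h
                  · push_neg at h; exact h.symm
                  · exact absurd p0 h
                obtain ⟨rest, hr⟩ := p0
                rw [← hr, hp]
                exact pv_blocked0 rest b
              · by_cases p1 : "ye".toList <+: (c :: s')
                · have hp : prev = 1 := by
                    rcases not_and_or.mp h2 with h | h
                    · push_neg at h; exact h.symm
                    · exact absurd p1 h
                  obtain ⟨rest, hr⟩ := p1
                  rw [← hr, hp]
                  exact pv_blocked1 rest b
                · by_cases p2 : "woo".toList <+: (c :: s')
                  · have hp : prev = 2 := by
                      rcases not_and_or.mp h3 with h | h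
                      · push_neg at h; exact h.symm
                      · exact absurd p2 h
                    obtain ⟨rest, hr⟩ := p2
                    rw [← hr, hp]
                    exact pv_blocked2 rest b
                  · by_cases p3 : "ma".toList <+: (c :: s')
                    · have hp : prev = 3 := by
                        rcases not_and_or.mp h4 with h | h
                        · push_neg at h; exact h.symm
                        · exact absurd p3 h
                      obtain ⟨rest, hr⟩ := p3
                      rw [← hr, hp]
                      exact pv_blocked3 rest b
                    · exact pv_nomatch c s' prev b
                        (by intro w hw; fin_cases hw <;> assumption)

theorem pv_outer (l : List String) : ∀ (acc : Int),
    l.foldl (fun answer i =>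
      let st := i.toList.foldl pvStepA ([], false, -1)
      if st.2.1 = true then answer + 1 else answer) acc
    = l.foldl (fun answer s =>
      if pvParse s.toList (-1) false then answer + 1 else answer) acc := by
  induction l with
  | nil => intro acc; rfl
  | cons s l ih =>
    intro acc
    simp only [List.foldl]
    rw [pv_inner s.toList.length s.toList le_rfl (-1) false]
    exact ih _

-- ===== VERDICT (by name: the statement is the Claim_ definition above) =====
theorem solution_spec : Claim_equal_solution := by
  intro babbling _
  unfold Spec_solution solution solution_alt
  exact pv_outer babbling 0
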